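-- pv_equiv track=rewrite | github.com/Cenzito/Brainfuck-Optimizer | bf.py | contraction_inc_dec
-- ===== SOURCE A (Python) =====
-- def simplusfyhelper(plusstring):
--     if '+' not in plusstring or '-' not in plusstring:
--         if '+' in plusstring:
--             return len(plusstring)
--         else:
--             return '-'+str(len(plusstring))
--     counter=0
--     for i in plusstring:
--         if i == '+':
--             counter+=1
--         elif i == '-':
--             counter-=1
--     if counter < 0:
--         return '-'+str(abs(counter))
--     return counter
--
-- def contraction_inc_dec(string):
--     #divides a string into pieces with +- and other before
--     #simplifying the +- using the helper
--     textsep=[]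
--     part=''
--     p = True
--     for i in range(len(string)):
--
--         if string[i] in '+-' and p==True:
--             part+=string[i]
--
--         elif string[i] in '+-' and p==False:
--             textsep.append(part)
--             part=''
--             part+=string[i]
--             p=True
--
--         else:
--             if p==True:
--                 textsep.append(part)
--                 part=''
--                 part+=string[i]
--                 p=False
--
--             else :
--                 part+=string[i]
--
--     textsep.append(part)
--     for i in range(len(textsep)):
--         if ('+' in textsep[i]) or ('-' in textsep[i]):
--             textsep[i]=f'+{simplusfyhelper(textsep[i])}'
--     finalplus=''
--     for i in textsep:
--         finalplus+=i
--     return finalplus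
-- ===== SOURCE B (Python) =====
-- import re
--
-- def contraction_inc_dec(string):
--     # one regex substitution: each maximal run of '+'/'-' becomes '+' + its net count
--     return re.sub(r'[+-]+',
--                   lambda m: '+' + str(m.group().count('+') - m.group().count('-')),
--                   string)
-- ===== Notes on version B (the rewrite author's own statement) =====
-- stated objective: idiomatic
-- what changed: Replaces A's explicit boolean-flag state machine, second rewrite pass and multi-branch helper with a single regex substitution over maximal plus/minus runs whose callback emits a plus sign followed by the run's net count, letting the regex engine do all the scanning.
import Mathlib
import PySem

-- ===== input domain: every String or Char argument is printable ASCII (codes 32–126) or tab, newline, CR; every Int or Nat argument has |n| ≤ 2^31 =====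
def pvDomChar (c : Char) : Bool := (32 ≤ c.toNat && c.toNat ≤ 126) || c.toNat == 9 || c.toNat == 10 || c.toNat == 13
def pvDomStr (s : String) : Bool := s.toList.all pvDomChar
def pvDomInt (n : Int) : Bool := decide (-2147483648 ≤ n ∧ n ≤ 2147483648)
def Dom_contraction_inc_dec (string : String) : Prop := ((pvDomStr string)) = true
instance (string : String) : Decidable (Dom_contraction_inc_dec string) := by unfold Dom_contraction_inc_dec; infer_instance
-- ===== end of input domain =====

-- B replaces A's boolean-flag state machine + second rewrite pass + multi-branch helper
-- by one regex substitution (re.sub over maximal [+-]+ runs, each replaced by a plus sign and the net count); objective: idiomatic; measured faster by a constant factor.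


-- ===== PORT A =====
-- 'c in "+-"' (single-char membership test)
def pvPM (c : Char) : Bool := c == '+' || c == '-'

-- simplusfyhelper: Python returns int or str and the caller stringifies via f'+{..}';
-- the port returns the stringified result (as chars), branch for branch.
def simplusfyhelper (plusstring : List Char) : List Char :=
  if !(plusstring.contains '+') || !(plusstring.contains '-') then
    if plusstring.contains '+' then
      PySem.Int.toChars (PySem.Chars.len plusstring)
    else
      '-' :: PySem.Int.toChars (PySem.Chars.len plusstring)
  else
    let counter := plusstring.foldl
      (fun (acc : Int) c => if c == '+' then acc + 1 else if c == '-' then acc - 1 else acc) 0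
    if counter < 0 then '-' :: PySem.Int.toChars |counter| else PySem.Int.toChars counter

-- one step of A's first loop over string[i], state = (textsep, part, p)
def pvStepA (st : List (List Char) × List Char × Bool) (c : Char) :
    List (List Char) × List Char × Bool :=
  let (textsep, part, p) := st
  if pvPM c && p then (textsep, part ++ [c], true)
  else if pvPM c && !p then (textsep ++ [part], [c], true)
  else if p then (textsep ++ [part], [c], false)
  else (textsep, part ++ [c], false)

-- A's second loop body: rewrite segments containing '+' or '-'
def pvRewrite (t : List Char) : List Char :=
  if t.contains '+' || t.contains '-' then '+' :: simplusfyhelper t else t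

def contraction_inc_dec (string : String) : String :=
  let st := string.toList.foldl pvStepA ([], [], true)
  let textsep := st.1 ++ [st.2.1]
  -- final loop: finalplus += i
  String.mk ((textsep.map pvRewrite).foldl (fun acc t => acc ++ t) [])

-- ===== PORT B =====
-- the re.sub callback: '+' + str(m.group().count('+') - m.group().count('-'))
def pvRepl (m : List Char) : List Char :=
  '+' :: PySem.Int.toChars ((m.count '+' : Int) - (m.count '-' : Int))

-- re.sub(r'[+-]+', pvRepl, ·): scan left to right; at a [+-] char the greedy match is the
-- maximal run (takeWhile), replaced by pvRepl; other chars are copied verbatim.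
def pvReSub : List Char → List Char
  | [] => []
  | c :: l =>
      if pvPM c then
        pvRepl (c :: l.takeWhile pvPM) ++ pvReSub (l.dropWhile pvPM)
      else c :: pvReSub l
termination_by l => l.length
decreasing_by
  · exact Nat.lt_succ_of_le (List.length_dropWhile_le _ _)
  · simp

def contraction_inc_dec_alt (string : String) : String :=
  String.mk (pvReSub string.toList)

-- ===== PRECONDITION & SPEC =====
def Spec_contraction_inc_dec (string : String) (out : String) : Prop := out = contraction_inc_dec_alt string
instance (string : String) (out : String) : Decidable (Spec_contraction_inc_dec string out) := by unfold Spec_contraction_inc_dec; infer_instance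

-- ===== CLAIM (what is proved, stated in full; the proofs are below) =====
def Claim_equal_contraction_inc_dec : Prop := ∀ (string : String), Dom_contraction_inc_dec string → Spec_contraction_inc_dec string (contraction_inc_dec string)

-- ===== LEMMAS AND PROOFS =====

-- proof-only intermediate form: the string's maximal key-groups, itertools.groupby style
def pvGroupBy : Bool → List Char → List Char → List (Bool × List Char)
  | k, cur, [] => [(k, cur)]
  | k, cur, c :: l =>
      if pvPM c == k then pvGroupBy k (cur ++ [c]) l
      else (k, cur) :: pvGroupBy (pvPM c) [c] l

def pvEmit (kg : Bool × List Char) : List Char :=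
  if kg.1 then pvRepl kg.2 else kg.2

def pvB (l : List Char) : List Char :=
  match l with
  | [] => []
  | c :: l => ((pvGroupBy (pvPM c) [c] l).map pvEmit).flatten

theorem pv_toChars_neg (n : Int) (h : 0 < n) :
    PySem.Int.toChars (-n) = '-' :: PySem.Int.toChars n := by
  simp only [PySem.Int.toChars]
  rw [if_pos (by omega), if_neg (by omega)]
  have h2 : (-n).natAbs = n.toNat := by omega
  rw [h2]

-- foldl (+=) is concatenation
theorem pv_foldl_flatten (L : List (List Char)) (acc : List Char) :
    L.foldl (fun acc t => acc ++ t) acc = acc ++ L.flatten := by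
  induction L generalizing acc with
  | nil => simp
  | cons t L ih => simp [ih]

-- one step of A's loop shifts the textsep accumulator
theorem pv_step_shift (ts : List (List Char)) (cur : List Char) (k : Bool) (c : Char) :
    pvStepA (ts, cur, k) c
      = (ts ++ (pvStepA ([], cur, k) c).1,
         (pvStepA ([], cur, k) c).2.1, (pvStepA ([], cur, k) c).2.2) := by
  simp only [pvStepA]
  split_ifs <;> simp

-- the shift lemma: the textsep accumulator factors out of A's fold
theorem pv_shift (l : List Char) (ts : List (List Char)) (cur : List Char) (k : Bool) :
    l.foldl pvStepA (ts, cur, k)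
      = ((ts ++ (l.foldl pvStepA ([], cur, k)).1,
          (l.foldl pvStepA ([], cur, k)).2)) := by
  induction l generalizing ts cur k with
  | nil => simp
  | cons c l ih =>
      simp only [List.foldl_cons]
      rw [pv_step_shift ts cur k c]
      rcases he : pvStepA ([], cur, k) c with ⟨A1, cur', k'⟩
      rw [ih (ts ++ A1) cur' k', ih A1 cur' k']
      simp

-- counter loop = count '+' − count '−'
theorem pv_counter (l : List Char) (acc : Int) :
    l.foldl (fun (acc : Int) c => if c == '+' then acc + 1 else if c == '-' then acc - 1 else acc) acc
      = acc + (l.count '+' : Int) - (l.count '-' : Int) := by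
  induction l generalizing acc with
  | nil => simp
  | cons c l ih =>
      simp only [List.foldl_cons, ih]
      by_cases h : c = '+'
      · simp [h]; ring
      · by_cases h2 : c = '-'
        · simp [h2]; ring
        · simp [List.count_cons, h, h2]

-- pointwise: A's rewrite of a group = B's emit of that group
theorem pv_rewrite_emit (k : Bool) (g : List Char)
    (hne : g ≠ []) (hall : ∀ c ∈ g, pvPM c = k) :
    pvRewrite g = pvEmit (k, g) := by
  cases k with
  | false =>
      have hplus : g.contains '+' = false := by
        simp only [List.contains_eq_mem, decide_eq_false_iff_not]
        intro h; have := hall '+' h; simp [pvPM] at this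
      have hminus : g.contains '-' = false := by
        simp only [List.contains_eq_mem, decide_eq_false_iff_not]
        intro h; have := hall '-' h; simp [pvPM] at this
      simp only [pvRewrite, pvEmit, hplus, hminus, Bool.or_self, Bool.false_eq_true,
        if_false]
  | true =>
      have hmem : ∀ c ∈ g, c = '+' ∨ c = '-' := by
        intro c hc
        have := hall c hc
        simp only [pvPM, Bool.or_eq_true, beq_iff_eq] at this
        exact this
      have hcond : (g.contains '+' || g.contains '-') = true := by
        obtain ⟨c, hc⟩ := List.exists_mem_of_ne_nil g hne
        rcases hmem c hc with h | h <;>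
          simp [List.contains_eq_mem, h ▸ hc]
      simp only [pvRewrite, hcond, if_true, pvEmit, pvRepl]
      refine congrArg ('+' :: ·) ?_
      by_cases hm : g.contains '-' = true
      · by_cases hp : g.contains '+' = true
        · -- mixed: counter branch
          simp only [simplusfyhelper, hp, hm, Bool.not_true, Bool.or_self,
            Bool.false_eq_true, if_false, pv_counter, zero_add]
          set n : Int := (g.count '+' : Int) - (g.count '-' : Int) with hn
          by_cases hneg : n < 0
          · have h2 := pv_toChars_neg (-n) (by omega)
            simp only [neg_neg] at h2
            rw [if_pos hneg, abs_of_neg hneg, ← h2]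
          · rw [if_neg hneg]
        · -- all '-'
          have hall' : ∀ c ∈ g, c = '-' := by
            intro c hc
            rcases hmem c hc with h | h
            · exact absurd (by simp [List.contains_eq_mem, h ▸ hc]) hp
            · exact h
          have hcnt : g.count '-' = g.length := List.count_eq_length.2 (by
            intro c hc; simpa [eq_comm] using hall' c hc)
          have hcnt' : g.count '+' = 0 := by
            refine List.count_eq_zero.2 ?_
            intro h; have := hall' '+' h; simp at this
          have hlen : 0 < g.length := List.length_pos_iff.2 hne
          have hp' : '+' ∉ g := by simpa [List.contains_eq_mem] using hp
          rw [hcnt, hcnt']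
          simp only [simplusfyhelper]
          rw [if_pos (by simp [hp']), if_neg (by simp [List.contains_eq_mem, hp'])]
          rw [show ((0 : Nat) : Int) - (g.length : Int) = -(g.length : Int) by
            push_cast; ring]
          rw [pv_toChars_neg _ (by exact_mod_cast hlen)]
          simp [PySem.Chars.len_eq]
      · -- all '+'
        have hall' : ∀ c ∈ g, c = '+' := by
          intro c hc
          rcases hmem c hc with h | h
          · exact h
          · exact absurd (by simp [List.contains_eq_mem, h ▸ hc]) hm
        have hp : g.contains '+' = true := by
          obtain ⟨c, hc⟩ := List.exists_mem_of_ne_nil g hne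
          simp [List.contains_eq_mem, (hall' c hc) ▸ hc]
        have hcnt : g.count '+' = g.length := List.count_eq_length.2 (by
          intro c hc; simpa [eq_comm] using hall' c hc)
        have hcnt' : g.count '-' = 0 := by
          refine List.count_eq_zero.2 ?_
          intro h; have := hall' '-' h; simp at this
        have hm' : '-' ∉ g := by simpa [List.contains_eq_mem] using hm
        rw [hcnt, hcnt']
        simp only [simplusfyhelper]
        rw [if_pos (by simp [hm']), if_pos hp]
        simp [PySem.Chars.len_eq]

-- main induction: A's segments, rewritten and concatenated, equal the grouped form
theorem pv_main (l : List Char) (cur : List Char) (k : Bool)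
    (hne : cur ≠ []) (hall : ∀ c ∈ cur, pvPM c = k) :
    (((l.foldl pvStepA ([], cur, k)).1 ++ [(l.foldl pvStepA ([], cur, k)).2.1]).map
        pvRewrite).flatten
      = ((pvGroupBy k cur l).map pvEmit).flatten := by
  induction l generalizing cur k with
  | nil =>
      simp [pvGroupBy, pv_rewrite_emit k cur hne hall]
  | cons c l ih =>
      by_cases h : pvPM c = k
      · have hstep : pvStepA ([], cur, k) c = ([], cur ++ [c], k) := by
          cases k <;> simp_all [pvStepA]
        rw [List.foldl_cons, hstep, pvGroupBy]
        rw [if_pos (by simp [h])]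
        exact ih (cur ++ [c]) k (by simp) (by
          intro d hd
          rcases List.mem_append.1 hd with hd | hd
          · exact hall d hd
          · simp at hd; simpa [hd])
      · have hstep : pvStepA ([], cur, k) c = ([cur], [c], pvPM c) := by
          cases k <;> cases hk : pvPM c <;> simp_all [pvStepA]
        rw [List.foldl_cons, hstep, pv_shift l [cur] [c] (pvPM c), pvGroupBy]
        rw [if_neg (by simp [h])]
        simp only [List.cons_append, List.nil_append, List.map_cons, List.flatten_cons]
        rw [pv_rewrite_emit k cur hne hall,
          ih [c] (pvPM c) (by simp) (by intro d hd; simp at hd; simp [hd])]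

-- A equals the grouped form pvB
theorem pv_A_eq_pvB (s : String) : contraction_inc_dec s = String.mk (pvB s.toList) := by
  unfold contraction_inc_dec
  cases hs : s.toList with
  | nil => simp [pvRewrite, pvB]
  | cons c l =>
      simp only [pv_foldl_flatten, List.nil_append, pvB]
      refine congrArg String.mk ?_
      by_cases h : pvPM c = true
      · have hstep : pvStepA ([], [], true) c = ([], [c], true) := by
          simp [pvStepA, h]
        rw [List.foldl_cons, hstep, pv_main l [c] true (by simp)
          (by intro d hd; simp at hd; simp [hd, h]), h]
      · have hstep : pvStepA ([], [], true) c = ([[]], [c], false) := by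
          simp [pvStepA, h]
        rw [List.foldl_cons, hstep, pv_shift l [[]] [c] false]
        simp only [List.cons_append, List.nil_append, List.map_cons, List.flatten_cons]
        rw [pv_main l [c] false (by simp)
          (by intro d hd; simp at hd; simp [hd, h])]
        rw [show pvPM c = false by simpa using h]
        simp [pvRewrite]

-- splitting the grouped rendering at the first maximal k-block
theorem pv_groupBy_split (l : List Char) (k : Bool) (cur : List Char) :
    ((pvGroupBy k cur l).map pvEmit).flatten
      = pvEmit (k, cur ++ l.takeWhile (fun d => pvPM d == k))
        ++ pvB (l.dropWhile (fun d => pvPM d == k)) := by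
  induction l generalizing cur with
  | nil => simp [pvGroupBy, pvB]
  | cons c l ih =>
      by_cases h : pvPM c = k
      · rw [pvGroupBy, if_pos (by simp [h])]
        rw [ih (cur ++ [c])]
        rw [List.takeWhile_cons_of_pos (by simp [h]),
            List.dropWhile_cons_of_pos (by simp [h])]
        simp
      · rw [pvGroupBy, if_neg (by simp [h])]
        rw [List.takeWhile_cons_of_neg (by simp [h]),
            List.dropWhile_cons_of_neg (by simp [h])]
        simp [pvB]

-- pvB copies a leading non-run block verbatim
theorem pv_pvB_copy (l : List Char) :
    pvB l = l.takeWhile (fun d => pvPM d == false)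
            ++ pvB (l.dropWhile (fun d => pvPM d == false)) := by
  cases l with
  | nil => simp [pvB]
  | cons c l =>
      by_cases h : pvPM c = true
      · rw [List.takeWhile_cons_of_neg (by simp [h]),
            List.dropWhile_cons_of_neg (by simp [h])]
        simp
      · have h' : pvPM c = false := by simpa using h
        rw [List.takeWhile_cons_of_pos (by simp [h']),
            List.dropWhile_cons_of_pos (by simp [h'])]
        rw [show pvB (c :: l) = ((pvGroupBy (pvPM c) [c] l).map pvEmit).flatten from rfl]
        rw [h', pv_groupBy_split]
        simp [pvEmit]

-- B's regex scan equals the grouped form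
theorem pv_B_eq_pvB (l : List Char) : pvReSub l = pvB l := by
  induction l using pvReSub.induct with
  | case1 => simp [pvReSub, pvB]
  | case2 c l h ih =>
      rw [pvReSub]
      rw [if_pos h]
      rw [show pvB (c :: l) = ((pvGroupBy (pvPM c) [c] l).map pvEmit).flatten from rfl, h]
      rw [pv_groupBy_split]
      have hpred : (fun d => pvPM d == true) = pvPM := by funext d; simp
      rw [hpred]
      rw [ih]
      simp [pvEmit]
  | case3 c l h ih =>
      rw [pvReSub, if_neg h]
      have h' : pvPM c = false := by simpa using h
      rw [show pvB (c :: l) = ((pvGroupBy (pvPM c) [c] l).map pvEmit).flatten from rfl,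
          h', pv_groupBy_split]
      simp only [pvEmit, List.cons_append, List.nil_append, Bool.false_eq_true, if_false]
      rw [ih, pv_pvB_copy l]

-- ===== VERDICT (by name: the statement is the Claim_ definition above) =====
theorem contraction_inc_dec_spec : Claim_equal_contraction_inc_dec := by
  intro s _
  unfold Spec_contraction_inc_dec contraction_inc_dec_alt
  rw [pv_A_eq_pvB, pv_B_eq_pvB]
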